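-- pv_equiv track=rewrite | github.com/yongkun521/DecoScreenBeautifier | src/core/layout_config.py | _find_first_available_slot
-- ===== SOURCE A (Python) =====
-- from typing import Dict, List, Optional, Tuple
--
-- def cells_for_pos(col: int, row: int, col_span: int, row_span: int) -> set[tuple[int, int]]:
--     return {
--         (c, r)
--         for c in range(col, col + col_span)
--         for r in range(row, row + row_span)
--     }
--
-- def _find_first_available_slot(
--     occupied: set[tuple[int, int]],
--     cols: int,
--     rows: int,
--     col_span: int,
--     row_span: int,
-- ) -> Optional[Tuple[int, int]]:
--     for row in range(rows):
--         for col in range(cols):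
--             if col + col_span > cols or row + row_span > rows:
--                 continue
--             target = cells_for_pos(col, row, col_span, row_span)
--             if occupied.isdisjoint(target):
--                 return (col, row)
--     return None
-- ===== SOURCE B (Python) =====
-- def _find_first_available_slot(occupied, cols, rows, col_span, row_span):
--     # Invert the problem: each occupied cell (x, y) blocks the window of
--     # candidate positions whose span-rectangle would cover it; build that
--     # blocked set once, then return the first candidate (row-major) that
--     # fits and is not blocked.
--     blocked = {
--         (c, r)
--         for (x, y) in occupied
--         for c in range(max(0, x - col_span + 1), min(x, cols - col_span) + 1)
--         for r in range(max(0, y - row_span + 1), min(y, rows - row_span) + 1)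
--     }
--     return next(
--         ((col, row)
--          for row in range(rows)
--          for col in range(cols)
--          if col + col_span <= cols and row + row_span <= rows
--          and (col, row) not in blocked),
--         None,
--     )
-- ===== Notes on version B (the rewrite author's own statement) =====
-- stated objective: alternative
-- what changed: Instead of a nested early-return scan that materialises the span x span cell set of every candidate and tests set disjointness, B precomputes once the set of candidate positions blocked by each occupied cell and returns, via next() over one flat row-major generator, the first fitting candidate not in that set.
import Mathlib
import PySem

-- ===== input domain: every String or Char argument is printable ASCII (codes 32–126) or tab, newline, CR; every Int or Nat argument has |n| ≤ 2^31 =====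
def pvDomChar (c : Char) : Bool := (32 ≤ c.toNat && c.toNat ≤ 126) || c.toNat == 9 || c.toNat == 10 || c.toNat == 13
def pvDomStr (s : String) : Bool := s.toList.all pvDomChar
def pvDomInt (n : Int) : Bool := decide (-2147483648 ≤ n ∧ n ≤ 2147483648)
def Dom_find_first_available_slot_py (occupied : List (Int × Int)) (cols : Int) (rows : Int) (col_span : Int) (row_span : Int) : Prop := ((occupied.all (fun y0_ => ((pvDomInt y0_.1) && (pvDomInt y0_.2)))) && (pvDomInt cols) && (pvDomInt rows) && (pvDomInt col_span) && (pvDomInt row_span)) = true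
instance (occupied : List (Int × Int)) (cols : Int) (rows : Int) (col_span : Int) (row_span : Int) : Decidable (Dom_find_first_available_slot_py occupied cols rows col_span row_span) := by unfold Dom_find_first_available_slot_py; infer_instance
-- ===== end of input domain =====

-- B inverts the problem: it precomputes once the set of candidate positions blocked by each occupied
-- cell and returns, from one flat row-major candidate list, the first fitting unblocked position.

-- ===== PORT A =====
-- 'for i in range(stop): if (r := f(i)) is not None: return r' — early-return loop, exact
def pvScan {beta : Type} (stop : Int) (f : Int → Option beta) (i : Int) : Option beta :=
  if i < stop then
    match f i with
    | some v => some v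
    | none => pvScan stop f (i + 1)
  else none
termination_by (stop - i).toNat
decreasing_by omega

def cells_for_pos_py (col : Int) (row : Int) (col_span : Int) (row_span : Int) : PySem.Set (Int × Int) :=
  (PySem.List.pyRange col (col + col_span) 1).foldl (fun s c =>
    (PySem.List.pyRange row (row + row_span) 1).foldl (fun s r => PySem.Set.add s (c, r)) s)
    PySem.Set.empty

def find_first_available_slot_py (occupied : List (Int × Int)) (cols : Int) (rows : Int) (col_span : Int) (row_span : Int) : Option (Int × Int) :=
  pvScan rows (fun row =>
    pvScan cols (fun col =>
      if cols < col + col_span ∨ rows < row + row_span then none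
      else if PySem.Set.isdisjoint occupied (cells_for_pos_py col row col_span row_span) then
        some (col, row)
      else none) 0) 0

-- ===== PORT B =====
-- the set comprehension: all candidate positions blocked by some occupied cell
def pvBlockedCands (occupied : List (Int × Int)) (cols : Int) (rows : Int) (col_span : Int) (row_span : Int) : List (Int × Int) :=
  occupied.flatMap (fun p =>
    (PySem.List.pyRange (max 0 (p.1 - col_span + 1)) (min p.1 (cols - col_span) + 1) 1).flatMap (fun c =>
      (PySem.List.pyRange (max 0 (p.2 - row_span + 1)) (min p.2 (rows - row_span) + 1) 1).map (fun r => (c, r))))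

-- 'next(generator, None)': first element of the flat row-major candidate stream passing the filter
def find_first_available_slot_py_alt (occupied : List (Int × Int)) (cols : Int) (rows : Int) (col_span : Int) (row_span : Int) : Option (Int × Int) :=
  let blocked := PySem.Set.ofList (pvBlockedCands occupied cols rows col_span row_span)
  ((PySem.List.pyRange 0 rows 1).flatMap (fun row =>
      (PySem.List.pyRange 0 cols 1).map (fun col => (col, row)))).find?
    (fun q => decide (q.1 + col_span ≤ cols) && decide (q.2 + row_span ≤ rows)
              && ! PySem.Set.contains blocked q)

-- ===== PRECONDITION & SPEC =====
def Spec_find_first_available_slot_py (occupied : List (Int × Int)) (cols : Int) (rows : Int) (col_span : Int) (row_span : Int) (out : Option (Int × Int)) : Prop := out = find_first_available_slot_py_alt occupied cols rows col_span row_span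
instance (occupied : List (Int × Int)) (cols : Int) (rows : Int) (col_span : Int) (row_span : Int) (out : Option (Int × Int)) : Decidable (Spec_find_first_available_slot_py occupied cols rows col_span row_span out) := by unfold Spec_find_first_available_slot_py; infer_instance

-- ===== CLAIM (what is proved, stated in full; the proofs are below) =====
def Claim_equal_find_first_available_slot_py : Prop := ∀ (occupied : List (Int × Int)) (cols : Int) (rows : Int) (col_span : Int) (row_span : Int), Dom_find_first_available_slot_py occupied cols rows col_span row_span → Spec_find_first_available_slot_py occupied cols rows col_span row_span (find_first_available_slot_py occupied cols rows col_span row_span)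

-- ===== LEMMAS AND PROOFS =====

theorem pv_mem_foldl_add {α β : Type} [BEq β] [LawfulBEq β] (l : List α) (f : α → β) (s : List β) (x : β) :
    x ∈ l.foldl (fun s a => PySem.Set.add s (f a)) s ↔ x ∈ s ∨ ∃ a ∈ l, x = f a := by
  induction l generalizing s with
  | nil => simp
  | cons a t ih =>
    simp only [List.foldl_cons, ih, PySem.Set.mem_add, List.mem_cons]
    constructor
    · rintro (h | ⟨b, hb, rfl⟩)
      · rcases h with h | h
        · exact Or.inl h
        · exact Or.inr ⟨a, Or.inl rfl, h⟩
      · exact Or.inr ⟨b, Or.inr hb, rfl⟩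
    · rintro (h | ⟨b, hb | hb, rfl⟩)
      · exact Or.inl (Or.inl h)
      · subst hb; exact Or.inl (Or.inr rfl)
      · exact Or.inr ⟨b, hb, rfl⟩

theorem pv_mem_foldl_add2 (lc lr : List Int) (s : List (Int × Int)) (x : Int × Int) :
    x ∈ lc.foldl (fun s c => lr.foldl (fun s r => PySem.Set.add s (c, r)) s) s ↔
      x ∈ s ∨ (x.1 ∈ lc ∧ x.2 ∈ lr) := by
  induction lc generalizing s with
  | nil => simp
  | cons c t ih =>
    simp only [List.foldl_cons, ih, List.mem_cons]
    rw [pv_mem_foldl_add lr (fun r => (c, r)) s x]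
    constructor
    · rintro (⟨h | ⟨r, hr, rfl⟩⟩ | ⟨h1, h2⟩)
      · exact Or.inl h
      · exact Or.inr ⟨Or.inl rfl, hr⟩
      · exact Or.inr ⟨Or.inr h1, h2⟩
    · rintro (h | ⟨h1 | h1, h2⟩)
      · exact Or.inl (Or.inl h)
      · refine Or.inl (Or.inr ⟨x.2, h2, ?_⟩); rw [← h1]
      · exact Or.inr ⟨h1, h2⟩

theorem pv_mem_cells (col row col_span row_span : Int) (x : Int × Int) :
    x ∈ cells_for_pos_py col row col_span row_span ↔
      (col ≤ x.1 ∧ x.1 < col + col_span) ∧ (row ≤ x.2 ∧ x.2 < row + row_span) := by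
  unfold cells_for_pos_py
  rw [pv_mem_foldl_add2]
  simp [PySem.Set.empty, PySem.List.mem_pyRange_one]

theorem pv_mem_blocked (occupied : List (Int × Int)) (cols rows col_span row_span : Int) (q : Int × Int) :
    q ∈ pvBlockedCands occupied cols rows col_span row_span ↔
      ∃ p ∈ occupied,
        (max 0 (p.1 - col_span + 1) ≤ q.1 ∧ q.1 < min p.1 (cols - col_span) + 1) ∧
        (max 0 (p.2 - row_span + 1) ≤ q.2 ∧ q.2 < min p.2 (rows - row_span) + 1) := by
  unfold pvBlockedCands
  simp only [List.mem_flatMap, List.mem_map, PySem.List.mem_pyRange_one]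
  constructor
  · rintro ⟨p, hp, c, hc, r, hr, rfl⟩
    exact ⟨p, hp, hc, hr⟩
  · rintro ⟨p, hp, hc, hr⟩
    exact ⟨p, hp, q.1, hc, q.2, hr, rfl⟩

theorem pvScan_eq {beta : Type} (stop : Int) (f : Int → Option beta) (i : Int) :
    pvScan stop f i = (PySem.List.pyRange i stop 1).findSome? f := by
  rw [pvScan]
  by_cases h : i < stop
  · rw [if_pos h, PySem.List.pyRange_one_cons h, List.findSome?_cons, pvScan_eq]
    rfl
  · rw [if_neg h, PySem.List.pyRange_one_eq_nil (by omega)]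
    rfl
termination_by (stop - i).toNat
decreasing_by omega

theorem pv_findSome?_flatMap {α β γ : Type} (l : List α) (f : α → List β) (g : β → Option γ) :
    (l.flatMap f).findSome? g = l.findSome? (fun a => (f a).findSome? g) := by
  induction l with
  | nil => rfl
  | cons a t ih =>
    rw [List.flatMap_cons, List.findSome?_append, List.findSome?_cons, ih]
    cases List.findSome? g (f a) <;> rfl

theorem pv_find?_eq_findSome? {α : Type} (l : List α) (p : α → Bool) :
    l.find? p = l.findSome? (fun x => if p x then some x else none) := by
  induction l with
  | nil => rfl
  | cons a t ih =>
    rw [List.find?_cons, List.findSome?_cons]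
    by_cases h : p a = true
    · simp [h]
    · rw [Bool.not_eq_true] at h; simp [h, ih]

theorem pv_findSome?_congr {α β : Type} (l : List α) (f g : α → Option β)
    (h : ∀ x ∈ l, f x = g x) : l.findSome? f = l.findSome? g := by
  induction l with
  | nil => rfl
  | cons a t ih =>
    simp only [List.findSome?_cons, h a (List.mem_cons_self), ih (fun x hx => h x (List.mem_cons_of_mem a hx))]

theorem pv_inner_eq (occupied : List (Int × Int)) (cols rows col_span row_span col row : Int)
    (hcol : 0 ≤ col ∧ col < cols) (hrow : 0 ≤ row ∧ row < rows)
    (hfit : ¬ (cols < col + col_span ∨ rows < row + row_span)) :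
    PySem.Set.isdisjoint occupied (cells_for_pos_py col row col_span row_span) =
      !(PySem.Set.contains (PySem.Set.ofList (pvBlockedCands occupied cols rows col_span row_span)) (col, row)) := by
  have hd := PySem.Set.isdisjoint_iff (s := occupied) (t := cells_for_pos_py col row col_span row_span)
  by_cases hc : PySem.Set.contains (PySem.Set.ofList (pvBlockedCands occupied cols rows col_span row_span)) (col, row) = true
  · rw [hc]
    rw [PySem.Set.contains_iff, PySem.Set.mem_ofList, pv_mem_blocked] at hc
    obtain ⟨p, hp, h1, h2⟩ := hc
    simp only [Bool.not_true]
    rw [← Bool.not_eq_true, hd]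
    push Not
    refine ⟨p, hp, ?_⟩
    rw [pv_mem_cells]
    omega
  · rw [Bool.not_eq_true] at hc
    rw [hc]
    simp only [Bool.not_false]
    rw [hd]
    intro x hx hmem
    rw [pv_mem_cells] at hmem
    apply absurd hc
    simp only [Bool.not_eq_false]
    rw [PySem.Set.contains_iff, PySem.Set.mem_ofList, pv_mem_blocked]
    refine ⟨x, hx, ?_⟩
    omega

-- ===== VERDICT (by name: the statement is the Claim_ definition above) =====
theorem find_first_available_slot_py_spec : Claim_equal_find_first_available_slot_py := by
  intro occupied cols rows col_span row_span _
  unfold Spec_find_first_available_slot_py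
  unfold find_first_available_slot_py find_first_available_slot_py_alt
  rw [pvScan_eq]
  simp only [pvScan_eq]
  rw [pv_find?_eq_findSome?, pv_findSome?_flatMap]
  apply pv_findSome?_congr
  intro row hrow
  rw [List.findSome?_map]
  apply pv_findSome?_congr
  intro col hcol
  rw [PySem.List.mem_pyRange_one] at hrow hcol
  simp only [Function.comp]
  by_cases hfit : cols < col + col_span ∨ rows < row + row_span
  · rw [if_pos hfit]
    rcases hfit with h | h
    · simp [show ¬ (col + col_span ≤ cols) by omega]
    · simp [show ¬ (row + row_span ≤ rows) by omega]
  · rw [if_neg hfit]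
    rw [pv_inner_eq occupied cols rows col_span row_span col row hcol hrow hfit]
    have h1 : col + col_span ≤ cols := by omega
    have h2 : row + row_span ≤ rows := by omega
    simp only [decide_eq_true h1, decide_eq_true h2, Bool.true_and]
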